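-- pv_equiv track=rewrite | github.com/lukap3/adventofcode2022 | days/day23.py | exec_moves
-- ===== SOURCE A (Python) =====
-- def exec_moves(proposed_moves, elves):
--     position_counts = {}
--     for elf, new_position in proposed_moves.items():
--         if new_position:
--             if new_position in position_counts:
--                 position_counts[new_position] += 1
--             else:
--                 position_counts[new_position] = 1
--     for elf, new_position in proposed_moves.items():
--         if position_counts.get(new_position, 2) == 1:
--             elves.remove(elf)
--             elves.add(new_position)
--     return elves
-- ===== SOURCE B (Python) =====
-- def exec_moves(proposed_moves, elves):
--     # Single pass with speculative first-proposer + cancellation: no counting,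
--     # no second scan of proposed_moves.
--     pending = {}   # destination -> the sole elf proposing it so far
--     blocked = set()
--     for elf, new_position in proposed_moves.items():
--         if not new_position or new_position in blocked:
--             continue
--         if new_position in pending:
--             del pending[new_position]
--             blocked.add(new_position)
--         else:
--             pending[new_position] = elf
--     for new_position, elf in pending.items():
--         elves.remove(elf)
--         elves.add(new_position)
--     return elves
-- ===== Notes on version B (the rewrite author's own statement) =====
-- stated objective: alternative
-- what changed: B never counts and never re-scans proposed_moves: one speculative pass records the first proposer of each truthy destination in a pending dict and, on a conflict, deletes that entry and tombstones the destination in a blocked set, so the surviving pending entries are exactly the moves to apply.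
import Mathlib
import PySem

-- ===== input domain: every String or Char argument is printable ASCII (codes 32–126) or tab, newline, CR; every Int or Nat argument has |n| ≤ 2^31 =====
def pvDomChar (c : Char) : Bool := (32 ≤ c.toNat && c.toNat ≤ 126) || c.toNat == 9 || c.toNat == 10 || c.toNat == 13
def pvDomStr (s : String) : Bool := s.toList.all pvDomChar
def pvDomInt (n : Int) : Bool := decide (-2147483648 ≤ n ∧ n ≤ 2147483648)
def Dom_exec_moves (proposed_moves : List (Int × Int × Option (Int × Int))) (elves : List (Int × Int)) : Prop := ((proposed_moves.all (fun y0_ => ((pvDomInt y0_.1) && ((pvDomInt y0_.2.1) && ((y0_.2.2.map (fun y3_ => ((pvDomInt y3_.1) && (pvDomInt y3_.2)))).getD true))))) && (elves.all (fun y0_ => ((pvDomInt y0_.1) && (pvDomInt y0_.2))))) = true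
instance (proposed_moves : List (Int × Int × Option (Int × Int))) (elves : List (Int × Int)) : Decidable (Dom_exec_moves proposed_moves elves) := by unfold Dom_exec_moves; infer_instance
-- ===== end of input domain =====

-- B replaces A's count-then-rescan by a single speculative pass over proposed_moves: the first
-- proposer of each truthy destination is recorded in a pending dict, a conflict deletes that
-- entry and tombstones the destination in a blocked set; only the surviving pending moves are
-- applied.  Both Pythons mutate the 'elves' set in place with the SAME remove/add sequence;
-- the theorems below are about the returned value.

-- the dict proposed_moves, as PySem items (regrouping the flattened tuple into (key, value))
def pvItems (proposed_moves : List (Int × Int × Option (Int × Int))) :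
    List ((Int × Int) × Option (Int × Int)) :=
  (PySem.Dict.ofList (proposed_moves.map (fun it => ((it.1, it.2.1), it.2.2)))).items

-- ===== PORT A =====
-- A's first loop: count each truthy proposed destination
def pvCountsA (proposed_moves : List (Int × Int × Option (Int × Int))) :
    PySem.Dict (Int × Int) Int :=
  (pvItems proposed_moves).foldl (fun d it =>
    match it.2 with
    | some np => if d.contains np then d.modify np 0 (· + 1) else d.insert np 1
    | none => d) PySem.Dict.empty

-- second loop: position_counts.get(new_position, 2) == 1 → elves.remove(elf); elves.add(new_position)
-- (new_position = None is never a key of position_counts, so get returns the default 2 there);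
-- elves.remove on a missing elf is a KeyError: the Option state goes none (excluded by Pre_)
def exec_moves (proposed_moves : List (Int × Int × Option (Int × Int))) (elves : List (Int × Int)) : List (Int × Int) :=
  ((pvItems proposed_moves).foldl (fun (os : Option (PySem.Set (Int × Int))) it =>
      match it.2 with
      | some np =>
        if (pvCountsA proposed_moves).getD np 2 == 1 then
          os.bind (fun s => (PySem.Set.remove? s it.1).map (fun s' => PySem.Set.add s' np))
        else os
      | none => os) (some (PySem.Set.ofList elves))).getD []

-- ===== PORT B =====
-- B's first loop: skip falsy/blocked destinations; a conflict deletes the pending entry and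
-- blocks the destination; otherwise record this elf as the destination's first proposer
def pvStepB (st : PySem.Dict (Int × Int) (Int × Int) × PySem.Set (Int × Int))
    (it : (Int × Int) × Option (Int × Int)) :
    PySem.Dict (Int × Int) (Int × Int) × PySem.Set (Int × Int) :=
  match it.2 with
  | none => st
  | some np =>
    if st.2.contains np then st
    else if st.1.contains np then (st.1.erase np, PySem.Set.add st.2 np)
    else (st.1.insert np it.1, st.2)

def pvPendB (proposed_moves : List (Int × Int × Option (Int × Int))) :
    PySem.Dict (Int × Int) (Int × Int) × PySem.Set (Int × Int) :=
  (pvItems proposed_moves).foldl pvStepB (PySem.Dict.empty, PySem.Set.empty)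

-- B's second loop: apply the surviving pending moves (KeyError on remove → none, as in A's port)
def exec_moves_alt (proposed_moves : List (Int × Int × Option (Int × Int))) (elves : List (Int × Int)) : List (Int × Int) :=
  (((pvPendB proposed_moves).1.items).foldl (fun (os : Option (PySem.Set (Int × Int))) pe =>
      os.bind (fun s => (PySem.Set.remove? s pe.2).map (fun s' => PySem.Set.add s' pe.1)))
    (some (PySem.Set.ofList elves))).getD []

-- ===== PRECONDITION & SPEC =====
-- the truthy (elf, destination) proposals, in dict order
def pvPairs (proposed_moves : List (Int × Int × Option (Int × Int))) :
    List ((Int × Int) × (Int × Int)) :=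
  (pvItems proposed_moves).filterMap (fun it => it.2.map (fun np => (it.1, np)))

def pvDests (proposed_moves : List (Int × Int × Option (Int × Int))) : List (Int × Int) :=
  (pvPairs proposed_moves).map (·.2)

def pvUniqMoves (proposed_moves : List (Int × Int × Option (Int × Int))) :
    List ((Int × Int) × (Int × Int)) :=
  (pvPairs proposed_moves).filter (fun ep => (pvDests proposed_moves).count ep.2 == 1)

-- Pre_ excludes exactly the inputs where Python A raises KeyError: each uniquely moving elf must be
-- in elves when its turn comes, i.e. be an original elf or the destination of an earlier unique move.
def Pre_exec_moves (proposed_moves : List (Int × Int × Option (Int × Int))) (elves : List (Int × Int)) : Prop :=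
  ∀ i < (pvUniqMoves proposed_moves).length,
    ((pvUniqMoves proposed_moves)[i]!).1 ∈ elves ∨
      ∃ j < i, ((pvUniqMoves proposed_moves)[j]!).2 = ((pvUniqMoves proposed_moves)[i]!).1
instance (proposed_moves : List (Int × Int × Option (Int × Int))) (elves : List (Int × Int)) : Decidable (Pre_exec_moves proposed_moves elves) := by unfold Pre_exec_moves; infer_instance

def pvWitness_exec_moves : (List (Int × Int × Option (Int × Int))) × (List (Int × Int)) :=
  ([(0, 0, some (1, 1)), (4, 4, none)], [(0, 0), (4, 4)])

def Spec_exec_moves (proposed_moves : List (Int × Int × Option (Int × Int))) (elves : List (Int × Int)) (out : List (Int × Int)) : Prop := out = exec_moves_alt proposed_moves elves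
instance (proposed_moves : List (Int × Int × Option (Int × Int))) (elves : List (Int × Int)) (out : List (Int × Int)) : Decidable (Spec_exec_moves proposed_moves elves out) := by unfold Spec_exec_moves; infer_instance

-- ===== CLAIM (what is proved, stated in full; the proofs are below) =====
def Claim_equal_exec_moves : Prop := ∀ (proposed_moves : List (Int × Int × Option (Int × Int))) (elves : List (Int × Int)), Dom_exec_moves proposed_moves elves → Pre_exec_moves proposed_moves elves → Spec_exec_moves proposed_moves elves (exec_moves proposed_moves elves)

-- ===== LEMMAS AND PROOFS =====

-- the move executed for one uniquely proposed (elf, destination) pair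
def pvOp (os : Option (PySem.Set (Int × Int))) (ep : (Int × Int) × (Int × Int)) :
    Option (PySem.Set (Int × Int)) :=
  os.bind (fun s => (PySem.Set.remove? s ep.1).map (fun s' => PySem.Set.add s' ep.2))

-- the uniquely-destined pairs of an arbitrary pair list (pvUniqMoves pm = uniqIn (pvPairs pm))
def uniqIn (l : List ((Int × Int) × (Int × Int))) : List ((Int × Int) × (Int × Int)) :=
  l.filter (fun ep => (l.map (·.2)).count ep.2 == 1)

-- B's pair-level step (pvStepB seen through the truthy-pair filterMap)
def pvStepB' (st : PySem.Dict (Int × Int) (Int × Int) × PySem.Set (Int × Int))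
    (ep : (Int × Int) × (Int × Int)) :
    PySem.Dict (Int × Int) (Int × Int) × PySem.Set (Int × Int) :=
  if st.2.contains ep.2 then st
  else if st.1.contains ep.2 then (st.1.erase ep.2, PySem.Set.add st.2 ep.2)
  else (st.1.insert ep.2 ep.1, st.2)

theorem foldl_filterMap_eq {α β σ : Type} (h : α → Option β) (g : σ → β → σ) (f : σ → α → σ)
    (hfg : ∀ s x, f s x = match h x with | some y => g s y | none => s) :
    ∀ (l : List α) (s : σ), l.foldl f s = (l.filterMap h).foldl g s := by
  intro l
  induction l with
  | nil => intro s; rfl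
  | cons x t ih =>
    intro s
    simp only [List.foldl_cons, List.filterMap_cons]
    rw [hfg]
    cases h x with
    | none => exact ih s
    | some y => simp only [List.foldl_cons]; exact ih (g s y)

theorem filterMap_if_eq_filter_map {α β : Type} (q : α → Bool) (F : α → β) :
    ∀ l : List α, (l.filterMap (fun x => if q x then some (F x) else none)) = (l.filter q).map F := by
  intro l
  induction l with
  | nil => rfl
  | cons x t ih =>
    simp only [List.filterMap_cons, List.filter_cons]
    by_cases hq : q x = true
    · simp [hq, ih]
    · simp [hq, ih]

theorem getD2_counter_eq (xs : List (Int × Int)) (p : Int × Int) :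
    ((PySem.Dict.counter xs).getD p 2 == 1) = (xs.count p == 1) := by
  by_cases hp : p ∈ xs
  · have hco : (PySem.Dict.counter xs).contains p = true := by
      rw [PySem.Dict.contains_counter]
      exact List.elem_eq_true_of_mem hp
    rw [PySem.Dict.contains_eq_isSome_get?] at hco
    obtain ⟨v, hv⟩ := Option.isSome_iff_exists.mp hco
    have h0 : (PySem.Dict.counter xs).getD p 0 = v := by
      rw [PySem.Dict.getD_eq_get?_getD, hv]; rfl
    have h2 : (PySem.Dict.counter xs).getD p 2 = v := by
      rw [PySem.Dict.getD_eq_get?_getD, hv]; rfl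
    have hc : v = (xs.count p : Int) := by rw [← h0, PySem.Dict.getD_counter]
    rw [h2, hc]
    clear h0 h2 hc hv hco hp
    rcases eq_or_ne (xs.count p) 1 with h | h
    · simp [h]
    · simp [h, show (xs.count p : Int) ≠ 1 by exact_mod_cast h]
  · have hco : (PySem.Dict.counter xs).contains p = false := by
      rw [PySem.Dict.contains_counter]
      simp [hp]
    have h2 : (PySem.Dict.counter xs).getD p 2 = 2 := PySem.Dict.getD_of_not_contains _ _ hco
    rw [h2, List.count_eq_zero_of_not_mem hp]
    decide

theorem pvDests_eq (pm : List (Int × Int × Option (Int × Int))) :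
    pvDests pm = (pvItems pm).filterMap (fun it => it.2) := by
  unfold pvDests pvPairs
  rw [List.map_filterMap]
  congr 1
  funext it
  cases it.2 <;> rfl

theorem countsA_eq (pm : List (Int × Int × Option (Int × Int))) :
    pvCountsA pm = PySem.Dict.counter (pvDests pm) := by
  unfold pvCountsA
  rw [foldl_filterMap_eq (fun it => it.2) (fun d np => d.modify np 0 (· + 1)) _ ?hfg]
  · rw [← pvDests_eq, PySem.Dict.counter_eq_foldl]
  case hfg =>
    intro d it
    obtain ⟨e, o⟩ := it
    cases o with
    | none => rfl
    | some np =>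
      show (if d.contains np then d.modify np 0 (· + 1) else d.insert np 1)
          = d.modify np 0 (· + 1)
      by_cases h : d.contains np = true
      · rw [if_pos h]
      · rw [if_neg h]
        show d.insert np 1 = d.insert np (d.getD np 0 + 1)
        rw [PySem.Dict.getD_of_not_contains _ _ (by simpa using h)]
        norm_num

theorem uniq_eq_filterMap (pm : List (Int × Int × Option (Int × Int))) :
    pvUniqMoves pm
      = (pvItems pm).filterMap (fun it =>
          match it.2 with
          | some np => if (pvDests pm).count np == 1 then some (it.1, np) else none
          | none => none) := by
  unfold pvUniqMoves
  have h := filterMap_if_eq_filter_map (fun ep => (pvDests pm).count ep.2 == 1)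
    (id : (Int × Int) × (Int × Int) → (Int × Int) × (Int × Int)) (pvPairs pm)
  rw [List.map_id] at h
  rw [← h]
  unfold pvPairs
  rw [List.filterMap_filterMap]
  congr 1
  funext it
  cases it.2 <;> rfl

theorem exec_moves_eq_fold (pm : List (Int × Int × Option (Int × Int))) (elves : List (Int × Int)) :
    exec_moves pm elves
      = ((pvUniqMoves pm).foldl pvOp (some (PySem.Set.ofList elves))).getD [] := by
  unfold exec_moves
  congr 1
  rw [foldl_filterMap_eq (fun it =>
        match it.2 with
        | some np => if (pvDests pm).count np == 1 then some (it.1, np) else none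
        | none => none) pvOp _ ?hfg]
  · rw [uniq_eq_filterMap]
  case hfg =>
    intro os it
    obtain ⟨e, o⟩ := it
    cases o with
    | none => rfl
    | some np =>
      simp only [countsA_eq, getD2_counter_eq]
      by_cases hc : ((pvDests pm).count np == 1) = true
      · simp only [hc, if_true]
        rfl
      · simp only [hc, if_false, Bool.false_eq_true]

-- ----- B-side lemmas -----

theorem pendB_eq_pairs_fold (pm : List (Int × Int × Option (Int × Int))) :
    pvPendB pm = (pvPairs pm).foldl pvStepB' (PySem.Dict.empty, PySem.Set.empty) := by
  unfold pvPendB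
  rw [foldl_filterMap_eq (fun it => it.2.map (fun np => (it.1, np))) pvStepB' pvStepB ?hfg]
  · rfl
  case hfg =>
    intro st it
    obtain ⟨e, o⟩ := it
    cases o <;> rfl

theorem count_dests_append (l : List ((Int × Int) × (Int × Int))) (p : (Int × Int) × (Int × Int))
    (x : Int × Int) :
    ((l ++ [p]).map (·.2)).count x
      = (l.map (·.2)).count x + (if x = p.2 then 1 else 0) := by
  rw [List.map_append, List.count_append]
  simp only [List.map_cons, List.map_nil, List.count_singleton]
  by_cases hx : x = p.2
  · simp [hx]
  · simp [hx, Ne.symm hx]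

theorem uniqIn_append (l : List ((Int × Int) × (Int × Int))) (p : (Int × Int) × (Int × Int)) :
    uniqIn (l ++ [p])
      = l.filter (fun q => ((l.map (·.2)).count q.2 == 1) && !(q.2 == p.2))
        ++ (if (l.map (·.2)).count p.2 = 0 then [p] else []) := by
  unfold uniqIn
  rw [List.filter_append]
  congr 1
  · apply List.filter_congr
    intro q hq
    rw [count_dests_append]
    by_cases hd : q.2 = p.2
    · have hpos : 0 < (l.map (·.2)).count p.2 := by
        apply List.count_pos_iff.mpr
        exact hd ▸ List.mem_map_of_mem hq
      have hne : (l.map (·.2)).count q.2 + 1 ≠ 1 := by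
        rw [hd]; omega
      have hL : ((List.count p.2 (List.map (fun x => x.2) l) + 1) == 1) = false := by
        simp only [beq_eq_false_iff_ne]
        omega
      simp [hd, hL]
    · simp [hd]
  · rw [List.filter_singleton, count_dests_append, if_pos rfl]
    by_cases h0 : (l.map (·.2)).count p.2 = 0
    · simp [h0]
    · have hf : (((l.map (·.2)).count p.2 + 1) == 1) = false := by
        simp only [beq_eq_false_iff_ne]
        omega
      rw [hf, if_neg h0]
      rfl

theorem mem_map_snd_uniqIn (l : List ((Int × Int) × (Int × Int))) (d : Int × Int) :
    d ∈ (uniqIn l).map (·.2) ↔ (l.map (·.2)).count d = 1 := by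
  constructor
  · intro h
    obtain ⟨q, hq, h2⟩ := List.mem_map.mp h
    have := (List.mem_filter.mp hq).2
    rw [← h2]
    exact eq_of_beq this
  · intro h
    have hpos : 0 < (l.map (·.2)).count d := by omega
    obtain ⟨q, hql, hq2⟩ := List.mem_map.mp (List.count_pos_iff.mp hpos)
    refine List.mem_map.mpr ⟨q, List.mem_filter.mpr ⟨hql, ?_⟩, hq2⟩
    rw [hq2, h]
    rfl

-- the loop invariant of B's first pass: the pending items are exactly the uniquely-destined
-- pairs seen so far (as (dest, elf)), and blocked holds exactly the multiply-proposed dests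
theorem pendB_inv (l : List ((Int × Int) × (Int × Int))) :
    (l.foldl pvStepB' (PySem.Dict.empty, PySem.Set.empty)).1.items
        = (uniqIn l).map (fun ep => (ep.2, ep.1))
    ∧ ∀ x, x ∈ (l.foldl pvStepB' (PySem.Dict.empty, PySem.Set.empty)).2
        ↔ 2 ≤ (l.map (·.2)).count x := by
  induction l using List.reverseRecOn with
  | nil => exact ⟨rfl, by intro x; simp [PySem.Set.empty]⟩
  | append_singleton l p ih =>
    obtain ⟨him, hbl⟩ := ih
    set st := l.foldl pvStepB' (PySem.Dict.empty, PySem.Set.empty) with hst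
    rw [List.foldl_append, List.foldl_cons, List.foldl_nil]
    have hkeys : st.1.keys = (uniqIn l).map (·.2) := by
      show st.1.items.map (·.1) = _
      rw [him, List.map_map]
      rfl
    have hcont : st.1.contains p.2 = true ↔ (l.map (·.2)).count p.2 = 1 := by
      rw [PySem.Dict.contains_iff_mem_keys, hkeys, mem_map_snd_uniqIn]
    have hbcont : st.2.contains p.2 = true ↔ 2 ≤ (l.map (·.2)).count p.2 := by
      rw [PySem.Set.contains_iff, hbl]
    rcases Nat.lt_or_ge ((l.map (·.2)).count p.2) 2 with hlt | hge2
    · have hb : st.2.contains p.2 = false := by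
        rw [Bool.eq_false_iff]; intro h; have := hbcont.mp h; omega
      rcases Nat.eq_zero_or_pos ((l.map (·.2)).count p.2) with h0 | hpos
      · -- fresh destination: insert this elf as first proposer
        have hm : st.1.contains p.2 = false := by
          rw [Bool.eq_false_iff]; intro h; have := hcont.mp h; omega
        have hstep : pvStepB' st p = (st.1.insert p.2 p.1, st.2) := by
          unfold pvStepB'; rw [hb, hm]; simp
        rw [hstep]
        constructor
        · show (st.1.insert p.2 p.1).items = _
          rw [PySem.Dict.items_insert_of_not_contains _ _ hm, him, uniqIn_append, if_pos h0]
          have hfl : l.filter (fun q => ((l.map (·.2)).count q.2 == 1) && !(q.2 == p.2))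
              = uniqIn l := by
            apply List.filter_congr
            intro q hq
            have hne : q.2 ≠ p.2 := by
              intro he
              have : 0 < (l.map (·.2)).count p.2 :=
                List.count_pos_iff.mpr (he ▸ List.mem_map_of_mem hq)
              omega
            simp [hne]
          rw [hfl, List.map_append]
          rfl
        · intro x
          show x ∈ st.2 ↔ _
          rw [hbl, count_dests_append]
          by_cases hx : x = p.2
          · subst hx; simp [h0]
          · simp [hx]
      · -- second proposal of this destination: delete the pending entry, block it
        have hc1 : (l.map (·.2)).count p.2 = 1 := by omega
        have hm : st.1.contains p.2 = true := hcont.mpr hc1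
        have hstep : pvStepB' st p = (st.1.erase p.2, PySem.Set.add st.2 p.2) := by
          unfold pvStepB'; rw [hb, hm]; simp
        rw [hstep]
        constructor
        · show st.1.items.filter (fun q => !(q.1 == p.2)) = _
          rw [him, List.filter_map]
          rw [uniqIn_append, if_neg (by omega), List.append_nil]
          show ((uniqIn l).filter (fun ep => !(ep.2 == p.2))).map _ = _
          unfold uniqIn
          rw [List.filter_filter]
          congr 1
          apply List.filter_congr
          intro q _
          exact Bool.and_comm _ _
        · intro x
          rw [PySem.Set.mem_add, hbl, count_dests_append]
          by_cases hx : x = p.2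
          · subst hx; simp [hc1]
          · simp [hx]
    · -- already blocked: skip
      have hb : st.2.contains p.2 = true := hbcont.mpr hge2
      have hstep : pvStepB' st p = st := by
        unfold pvStepB'; rw [hb]; simp
      rw [hstep]
      constructor
      · rw [him, uniqIn_append, if_neg (by omega), List.append_nil]
        congr 1
        symm
        apply List.filter_congr
        intro q hq
        by_cases h1 : ((l.map (·.2)).count q.2 == 1) = true
        · have hne : q.2 ≠ p.2 := by
            intro he
            have := eq_of_beq h1
            rw [he] at this
            omega
          simp [h1, hne]
        · simp [Bool.eq_false_iff.mpr h1]
      · intro x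
        rw [hbl, count_dests_append]
        by_cases hx : x = p.2
        · subst hx
          constructor <;> intro _ <;> omega
        · simp [hx]

theorem pendB_items (pm : List (Int × Int × Option (Int × Int))) :
    (pvPendB pm).1.items = (pvUniqMoves pm).map (fun ep => (ep.2, ep.1)) := by
  rw [pendB_eq_pairs_fold]
  have h := (pendB_inv (pvPairs pm)).1
  rw [h]
  rfl

theorem exec_moves_alt_eq_fold (pm : List (Int × Int × Option (Int × Int))) (elves : List (Int × Int)) :
    exec_moves_alt pm elves
      = ((pvUniqMoves pm).foldl pvOp (some (PySem.Set.ofList elves))).getD [] := by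
  unfold exec_moves_alt
  rw [pendB_items, List.foldl_map]
  rfl

-- ===== VERDICT (by name: the statement is the Claim_ definition above) =====
theorem exec_moves_spec : Claim_equal_exec_moves := by
  intro pm elves _ _
  unfold Spec_exec_moves
  rw [exec_moves_eq_fold, exec_moves_alt_eq_fold]
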